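-- pv_equiv track=rewrite | github.com/tarjeiba/fagdag-2p | oppgavegenerator.py | range_freq_table
-- ===== SOURCE A (Python) =====
-- def range_freq_table(lst_of_tups):
--     """Return the range of the values in a frequency table."""
--     values = [tup[0] for tup in lst_of_tups]
--     counts = [tup[1] for tup in lst_of_tups]
--     low_ind = 0
--     high_ind = -1
--     while True:
--         if counts[low_ind] != 0:
--             lowest = values[low_ind]
--             break
--         low_ind += 1
--     while True:
--         if counts[high_ind] != 0:
--             highest = values[high_ind]
--             break
--         high_ind -= 1
--
--     return highest - lowest
-- ===== SOURCE B (Python) =====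
-- def range_freq_table(lst_of_tups):
--     """Return the range of the values in a frequency table."""
--     nonzero = [v for v, c in lst_of_tups if c != 0]
--     return nonzero[-1] - nonzero[0]
-- ===== Notes on version B (the rewrite author's own statement) =====
-- stated objective: simpler
-- what changed: Replaces the two inward-scanning index loops (forward for the first nonzero count, backward with negative indices for the last) by one filtering pass that keeps the values with nonzero count, then subtracts the first kept value from the last.
import Mathlib
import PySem

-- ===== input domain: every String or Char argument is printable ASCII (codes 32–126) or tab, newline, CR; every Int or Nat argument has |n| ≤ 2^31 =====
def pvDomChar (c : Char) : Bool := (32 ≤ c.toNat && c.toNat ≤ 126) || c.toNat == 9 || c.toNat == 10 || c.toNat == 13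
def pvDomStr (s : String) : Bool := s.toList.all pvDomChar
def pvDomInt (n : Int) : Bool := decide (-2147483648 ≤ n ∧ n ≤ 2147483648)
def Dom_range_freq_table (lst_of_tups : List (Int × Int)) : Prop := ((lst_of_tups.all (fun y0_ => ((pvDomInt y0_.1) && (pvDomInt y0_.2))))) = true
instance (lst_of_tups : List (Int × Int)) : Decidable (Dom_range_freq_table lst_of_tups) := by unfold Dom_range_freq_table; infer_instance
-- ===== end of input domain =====

-- B replaces A's two inward-scanning index loops by one filter of nonzero-count values
-- followed by last-minus-first (objective: simpler).

-- ===== PORT A =====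
-- A's forward while-loop (index 0,1,2,…) resp. backward while-loop (index -1,-2,…) scan
-- counts/values in lockstep until a nonzero count; ported as structural recursion over the
-- two lists (the backward loop is the same scan on the reversed lists). `none` = IndexError
-- (all counts zero), excluded by Pre_; the port returns 0 there.
def pvScanA : List Int → List Int → Option Int
  | c :: cs, v :: vs => if c ≠ 0 then some v else pvScanA cs vs
  | _, _ => none

def range_freq_table (lst_of_tups : List (Int × Int)) : Int :=
  let values := lst_of_tups.map Prod.fst
  let counts := lst_of_tups.map Prod.snd
  match pvScanA counts values, pvScanA counts.reverse values.reverse with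
  | some lowest, some highest => highest - lowest
  | _, _ => 0

-- ===== PORT B =====
-- nonzero[-1] and nonzero[0] via PySem.List.pyGet?; none = IndexError (empty filter result),
-- excluded by Pre_; the port returns 0 there.
def range_freq_table_alt (lst_of_tups : List (Int × Int)) : Int :=
  let nonzero := (lst_of_tups.filter (fun p => p.2 ≠ 0)).map Prod.fst
  match PySem.List.pyGet? nonzero (-1) with
  | none => 0
  | some hi =>
    match PySem.List.pyGet? nonzero 0 with
    | none => 0
    | some lo => hi - lo

-- ===== PRECONDITION & SPEC =====
-- Both Pythons raise IndexError exactly when no tuple has a nonzero count (in particular on []).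
def Pre_range_freq_table (lst_of_tups : List (Int × Int)) : Prop :=
  ∃ p ∈ lst_of_tups, p.2 ≠ 0
instance (lst_of_tups : List (Int × Int)) : Decidable (Pre_range_freq_table lst_of_tups) := by
  unfold Pre_range_freq_table; infer_instance
def pvWitness_range_freq_table : (List (Int × Int)) := [(1, 0), (2, 3), (9, 2), (10, 0)]

def Spec_range_freq_table (lst_of_tups : List (Int × Int)) (out : Int) : Prop := out = range_freq_table_alt lst_of_tups
instance (lst_of_tups : List (Int × Int)) (out : Int) : Decidable (Spec_range_freq_table lst_of_tups out) := by unfold Spec_range_freq_table; infer_instance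

-- ===== CLAIM (what is proved, stated in full; the proofs are below) =====
def Claim_equal_range_freq_table : Prop := ∀ (lst_of_tups : List (Int × Int)), Dom_range_freq_table lst_of_tups → Pre_range_freq_table lst_of_tups → Spec_range_freq_table lst_of_tups (range_freq_table lst_of_tups)

-- ===== LEMMAS AND PROOFS =====

-- A's forward scan finds the head of the nonzero-filtered value list.
theorem pvScanA_eq_head (l : List (Int × Int)) :
    pvScanA (l.map Prod.snd) (l.map Prod.fst)
      = ((l.filter (fun p => p.2 ≠ 0)).map Prod.fst).head? := by
  induction l with
  | nil => rfl
  | cons p t ih =>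
    by_cases h : p.2 ≠ 0 <;> simp [pvScanA, h, ih]

theorem range_freq_table_spec : Claim_equal_range_freq_table := by
  intro l _ hpre
  have hnz : (l.filter (fun p => p.2 ≠ 0)).map Prod.fst ≠ [] := by
    obtain ⟨p, hp, hc⟩ := hpre
    simp only [ne_eq, List.map_eq_nil_iff, List.filter_eq_nil_iff, not_forall]
    exact ⟨p, hp, by simpa using hc⟩
  have h1 := pvScanA_eq_head l
  have h2 := pvScanA_eq_head l.reverse
  rw [List.map_reverse, List.map_reverse] at h2
  rw [List.filter_reverse, List.map_reverse, List.head?_reverse] at h2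
  unfold Spec_range_freq_table range_freq_table range_freq_table_alt
  simp only
  obtain ⟨a, t, he⟩ := List.exists_cons_of_ne_nil hnz
  rw [h1, h2, PySem.List.pyGet?_neg_one, PySem.List.pyGet?_zero, he]
  cases hg : (a :: t).getLast? with
  | none => simp at hg
  | some b => simp
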